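-- pv_equiv track=rewrite | github.com/ows-ali/Hacktoberfest | sock-merchant.py | sockMerchant
-- ===== SOURCE A (Python) =====
-- def sockMerchant(n, ar):
--     x = {}
--     p = 0
--     for i in ar:
--         c = 0
--         for j in ar:
--             if i == j:
--                 c += 1
--         x[i] = c
--     for i in x:
--         p += x[i]//2
--     return p
-- ===== SOURCE B (Python) =====
-- def sockMerchant(n, ar):
--     s = sorted(ar)
--     total = 0
--     run = 0
--     prev = None
--     for c in s:
--         if run > 0 and c == prev:
--             run += 1
--         else:
--             total += run // 2
--             run = 1
--             prev = c
--     total += run // 2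
--     return total
-- ===== Notes on version B (the rewrite author's own statement) =====
-- stated objective: faster
-- what changed: Replaces the nested rescan of ar for every element with sort-then-single-pass over runs of equal colors, adding run_len//2 as each run ends.
import Mathlib
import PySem

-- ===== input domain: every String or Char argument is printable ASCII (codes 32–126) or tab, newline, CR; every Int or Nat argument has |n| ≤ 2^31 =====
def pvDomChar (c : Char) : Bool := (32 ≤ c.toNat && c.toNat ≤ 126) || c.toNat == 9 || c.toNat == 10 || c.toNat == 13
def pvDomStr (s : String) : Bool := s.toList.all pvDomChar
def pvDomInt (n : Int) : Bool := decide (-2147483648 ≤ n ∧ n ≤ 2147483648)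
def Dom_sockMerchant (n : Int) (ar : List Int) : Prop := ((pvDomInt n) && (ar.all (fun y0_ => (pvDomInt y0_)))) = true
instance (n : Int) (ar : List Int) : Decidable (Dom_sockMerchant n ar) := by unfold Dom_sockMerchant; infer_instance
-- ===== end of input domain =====

-- B replaces A's O(n^2) nested rescans with sort-then-one-pass over runs of equal colors (faster: asymptotic).

-- ===== PORT A =====
-- for each i in ar, count occurrences of i by an inner scan, store in dict x; then sum x[i]//2 over keys.
-- (x[i] in the final loop always hits an existing key, so getD is exact there.)
def sockMerchant (n : Int) (ar : List Int) : Int :=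
  let x : PySem.Dict Int Int :=
    ar.foldl (fun d i =>
      d.insert i (ar.foldl (fun c j => if i == j then c + 1 else c) 0)) PySem.Dict.empty
  x.keys.foldl (fun p i => p + PySem.Int.floordiv (x.getD i 0) 2) 0

-- ===== PORT B =====
-- state (total, run, prev): one step of the run-scan loop body of Source B
def pvRunStep (st : Int × Int × Option Int) (c : Int) : Int × Int × Option Int :=
  if 0 < st.2.1 ∧ st.2.2 = some c then (st.1, st.2.1 + 1, st.2.2)
  else (st.1 + PySem.Int.floordiv st.2.1 2, 1, some c)

-- sort a copy, scan runs of consecutive equal colors, add run//2 at each run end and after the loop.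
def sockMerchant_alt (n : Int) (ar : List Int) : Int :=
  let s := PySem.List.sorted ar (fun x => x) false
  let st := s.foldl pvRunStep (0, 0, none)
  st.1 + PySem.Int.floordiv st.2.1 2

-- ===== PRECONDITION & SPEC =====
def Spec_sockMerchant (n : Int) (ar : List Int) (out : Int) : Prop := out = sockMerchant_alt n ar
instance (n : Int) (ar : List Int) (out : Int) : Decidable (Spec_sockMerchant n ar out) := by unfold Spec_sockMerchant; infer_instance

-- ===== CLAIM (what is proved, stated in full; the proofs are below) =====
def Claim_equal_sockMerchant : Prop := ∀ (n : Int) (ar : List Int), Dom_sockMerchant n ar → Spec_sockMerchant n ar (sockMerchant n ar)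

-- ===== LEMMAS AND PROOFS =====

-- A's inner scan computes the count of i in ar.
theorem pv_inner_count (ar : List Int) (i : Int) (c : Int) :
    ar.foldl (fun c j => if i == j then c + 1 else c) c = c + (ar.count i : Int) := by
  induction ar generalizing c with
  | nil => simp
  | cons a t ih =>
    simp only [List.foldl_cons, List.count_cons, ih]
    by_cases h : a = i
    · subst h; simp; ring
    · have h' : ¬ (i == a) = true := by simp [Ne.symm h]
      simp [h, h']

-- lookup in a dict built by inserting a key-determined value for every element of l.
theorem pv_getD_foldl_insert_fun (f : Int → Int) (l : List Int) (d : PySem.Dict Int Int) (k : Int) :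
    (l.foldl (fun d i => d.insert i (f i)) d).getD k 0
      = if k ∈ l then f k else d.getD k 0 := by
  induction l generalizing d with
  | nil => simp
  | cons a t ih =>
    simp only [List.foldl_cons, ih, List.mem_cons]
    by_cases ht : k ∈ t
    · simp [ht]
    · by_cases ha : k = a
      · simp [ha, PySem.Dict.getD_insert_self]
      · simp [ha, ht, PySem.Dict.getD_insert]

-- A equals the Finset sum of count//2 over the distinct colors.
theorem pvA_eq (n : Int) (ar : List Int) :
    sockMerchant n ar = ∑ k ∈ ar.toFinset, PySem.Int.floordiv ((ar.count k : Int)) 2 := by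
  have hkeys : (ar.foldl (fun d i =>
      d.insert i (ar.foldl (fun c j => if i == j then c + 1 else c) 0))
      (PySem.Dict.empty : PySem.Dict Int Int)).keys
      = PySem.Set.ofList ar := by
    rw [PySem.Dict.keys_foldl_insert]
    simp [PySem.Set.update, PySem.Set.ofList, PySem.Dict.keys_empty]
  unfold sockMerchant
  simp only
  rw [hkeys, PySem.List.foldl_add]
  have hmap : (PySem.Set.ofList ar).map
      (fun i => PySem.Int.floordiv
        ((ar.foldl (fun d i =>
          d.insert i (ar.foldl (fun c j => if i == j then c + 1 else c) 0))
          (PySem.Dict.empty : PySem.Dict Int Int)).getD i 0) 2)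
      = (PySem.Set.ofList ar).map (fun k => PySem.Int.floordiv ((ar.count k : Int)) 2) := by
    apply List.map_congr_left
    intro k hk
    have hmem : k ∈ ar := (PySem.Set.mem_ofList (xs := ar) (y := k)).1 hk
    rw [pv_getD_foldl_insert_fun, if_pos hmem, pv_inner_count ar k 0]
    norm_num
  rw [hmap, ← List.sum_toFinset _ (PySem.Set.nodup_ofList (xs := ar))]
  have hfs : (PySem.Set.ofList ar).toFinset = ar.toFinset := by
    ext k
    simp [PySem.Set.mem_ofList]
  rw [hfs]
  ring

-- run-scan bookkeeping lemmas
theorem pv_shift (s : List Int) (t0 d r : Int) (p : Option Int) :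
    s.foldl pvRunStep (t0 + d, r, p)
      = ((s.foldl pvRunStep (t0, r, p)).1 + d, (s.foldl pvRunStep (t0, r, p)).2) := by
  induction s generalizing t0 r p with
  | nil => simp
  | cons c s ih =>
    rw [List.foldl_cons, List.foldl_cons]
    by_cases h : 0 < r ∧ p = some c
    · have h1 : pvRunStep (t0 + d, r, p) c = (t0 + d, r + 1, p) := by
        simp [pvRunStep, h.1, h.2]
      have h2 : pvRunStep (t0, r, p) c = (t0, r + 1, p) := by
        simp [pvRunStep, h.1, h.2]
      rw [h1, h2]
      exact ih t0 (r + 1) p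
    · have h1 : pvRunStep (t0 + d, r, p) c
          = (t0 + d + PySem.Int.floordiv r 2, 1, some c) := by
        simp only [pvRunStep]
        rw [if_neg h]
      have h2 : pvRunStep (t0, r, p) c
          = (t0 + PySem.Int.floordiv r 2, 1, some c) := by
        simp only [pvRunStep]
        rw [if_neg h]
      rw [h1, h2, show t0 + d + PySem.Int.floordiv r 2
        = (t0 + PySem.Int.floordiv r 2) + d by ring]
      exact ih (t0 + PySem.Int.floordiv r 2) 1 (some c)

theorem pv_replicate (k : ℕ) (t0 r : Int) (a : Int) (hr : 0 < r) :
    (List.replicate k a).foldl pvRunStep (t0, r, some a) = (t0, r + k, some a) := by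
  induction k generalizing r with
  | zero => simp
  | succ k ih =>
    rw [List.replicate_succ, List.foldl_cons]
    have hstep : pvRunStep (t0, r, some a) a = (t0, r + 1, some a) := by
      simp [pvRunStep, hr]
    rw [hstep, ih (r + 1) (by omega)]
    have : r + 1 + (k : Int) = r + ((k + 1 : ℕ) : Int) := by push_cast; ring
    rw [this]

theorem pv_sep (s : List Int) (t0 r : Int) (a : Int) (ha : a ∉ s) :
    (s.foldl pvRunStep (t0, r, some a)).1
        + PySem.Int.floordiv (s.foldl pvRunStep (t0, r, some a)).2.1 2
      = t0 + PySem.Int.floordiv r 2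
        + ((s.foldl pvRunStep (0, 0, none)).1
            + PySem.Int.floordiv (s.foldl pvRunStep (0, 0, none)).2.1 2) := by
  cases s with
  | nil => simp
  | cons c s =>
    have hac : a ≠ c := fun h => ha (h ▸ List.mem_cons_self ..)
    rw [List.foldl_cons, List.foldl_cons]
    have h1 : pvRunStep (t0, r, some a) c
        = (t0 + PySem.Int.floordiv r 2, 1, some c) := by
      simp only [pvRunStep]
      rw [if_neg (by rintro ⟨-, h⟩; exact hac (Option.some.inj h))]
    have h2 : pvRunStep (0, 0, none) c = (0, 1, some c) := by
      simp [pvRunStep]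
    rw [h1, h2,
      show t0 + PySem.Int.floordiv r 2 = 0 + (t0 + PySem.Int.floordiv r 2) by ring,
      show t0 + PySem.Int.floordiv r 2 = 0 + (t0 + PySem.Int.floordiv r 2) by ring,
      pv_shift]
    ring

-- main run-scan lemma: on a sorted list the scan totals count//2 per distinct color.
theorem pv_runscan (N : ℕ) : ∀ s : List Int, s.length ≤ N → s.Pairwise (· ≤ ·) →
    (s.foldl pvRunStep (0, 0, none)).1
        + PySem.Int.floordiv (s.foldl pvRunStep (0, 0, none)).2.1 2
      = ∑ k ∈ s.toFinset, PySem.Int.floordiv ((s.count k : Int)) 2 := by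
  induction N with
  | zero =>
    intro s hlen _
    have hs : s = [] := List.eq_nil_of_length_eq_zero (Nat.le_zero.1 hlen)
    subst hs
    simp [PySem.Int.floordiv]
  | succ N ih =>
    intro s hlen hp
    match s, hp with
    | [], _ => simp [PySem.Int.floordiv]
    | a :: t, hp =>
      have hle : ∀ x ∈ t, a ≤ x := fun x hx => List.rel_of_pairwise_cons hp hx
      have hpt : t.Pairwise (· ≤ ·) := hp.of_cons
      obtain ⟨m, u, hm, hu⟩ : ∃ m u, m = (t.takeWhile (fun x => x == a)).length
          ∧ u = t.dropWhile (fun x => x == a) := ⟨_, _, rfl, rfl⟩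
      have hrep : t.takeWhile (fun x => x == a) = List.replicate m a := by
        rw [List.eq_replicate_iff]
        exact ⟨hm.symm, fun b hb => by simpa using List.mem_takeWhile_imp hb⟩
      have hdecomp : t = List.replicate m a ++ u := by
        conv_lhs => rw [← List.takeWhile_append_dropWhile (p := fun x => x == a) (l := t)]
        rw [hrep, hu]
      have hpu : u.Pairwise (· ≤ ·) :=
        hu ▸ List.Pairwise.sublist (List.dropWhile_sublist _) hpt
      have hau : a ∉ u := by
        subst hu
        intro hmem
        have hne : t.dropWhile (fun x => x == a) ≠ [] := List.ne_nil_of_mem hmem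
        have hhead := List.head_dropWhile_not (fun x => x == a) hne
        have hba : (t.dropWhile (fun x => x == a)).head hne ≠ a := by
          intro h
          rw [h] at hhead
          simp at hhead
        have hbmem : (t.dropWhile (fun x => x == a)).head hne ∈ t :=
          (List.dropWhile_sublist _).mem (List.head_mem hne)
        have hab : a < (t.dropWhile (fun x => x == a)).head hne :=
          lt_of_le_of_ne (hle _ hbmem) (Ne.symm hba)
        have hcons := List.cons_head_tail hne
        rw [← hcons] at hmem
        rcases List.mem_cons.1 hmem with h | h
        · exact absurd hab (by rw [← h]; exact lt_irrefl a)
        · have hpu' : ((t.dropWhile (fun x => x == a)).head hne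
              :: (t.dropWhile (fun x => x == a)).tail).Pairwise (· ≤ ·) := by
            rw [hcons]
            exact List.Pairwise.sublist (List.dropWhile_sublist _) hpt
          have := List.rel_of_pairwise_cons hpu' h
          omega
      have hulen : u.length ≤ N := by
        have h1 : u.length ≤ t.length := hu ▸ (List.dropWhile_sublist _).length_le
        have h2 : t.length + 1 ≤ N + 1 := by simpa using hlen
        omega
      have ihu := ih u hulen hpu
      -- evaluate the fold over a :: replicate m a ++ u
      have hfold : (a :: t).foldl pvRunStep (0, 0, none)
          = (List.replicate m a ++ u).foldl pvRunStep (0, 1, some a) := by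
        rw [List.foldl_cons]
        have hstate : pvRunStep (0, 0, none) a = ((0 : Int), (1 : Int), some a) := by
          simp [pvRunStep]
        rw [hstate, ← hdecomp]
      have hfold2 : (List.replicate m a ++ u).foldl pvRunStep (0, 1, some a)
          = u.foldl pvRunStep (0, 1 + (m : Int), some a) := by
        rw [List.foldl_append, pv_replicate m 0 1 a (by omega)]
      -- counts in s
      have hcau : u.count a = 0 := List.count_eq_zero.2 hau
      have hcs : ((a :: t).count a : Int) = 1 + (m : Int) := by
        rw [hdecomp]
        push_cast [List.count_cons, List.count_append, List.count_replicate, hcau,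
          beq_iff_eq]
        simp [add_comm]
      have hcsk : ∀ k ∈ u.toFinset, ((a :: t).count k : Int) = (u.count k : Int) := by
        intro k hk
        have hku : k ∈ u := List.mem_toFinset.1 hk
        have hka : k ≠ a := fun h => hau (h ▸ hku)
        rw [hdecomp]
        push_cast [List.count_cons, List.count_append, List.count_replicate,
          beq_iff_eq, hka, Ne.symm hka]
        simp
      have hfs : (a :: t).toFinset = insert a u.toFinset := by
        rw [hdecomp]
        ext k
        simp [List.mem_replicate]
        tauto
      have hanotin : a ∉ u.toFinset := fun h => hau (List.mem_toFinset.1 h)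
      rw [hfold, hfold2, pv_sep u 0 (1 + (m : Int)) a hau, ihu, hfs,
        Finset.sum_insert hanotin, hcs]
      have hsum : ∑ k ∈ u.toFinset, PySem.Int.floordiv (((a :: t).count k : Int)) 2
          = ∑ k ∈ u.toFinset, PySem.Int.floordiv ((u.count k : Int)) 2 :=
        Finset.sum_congr rfl (fun k hk => by rw [hcsk k hk])
      rw [hsum]
      ring

theorem pv_main (n : Int) (ar : List Int) : sockMerchant n ar = sockMerchant_alt n ar := by
  rw [pvA_eq]
  unfold sockMerchant_alt
  simp only
  have hp : (PySem.List.sorted ar (fun x => x) false).Pairwise (· ≤ ·) := by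
    simpa using PySem.List.sorted_pairwise ar (fun x => x)
  rw [pv_runscan (PySem.List.sorted ar (fun x => x) false).length _ le_rfl hp]
  have hperm := PySem.List.sorted_perm ar (fun x => x) false
  have hfs : (PySem.List.sorted ar (fun x => x) false).toFinset = ar.toFinset := by
    ext k
    simp [hperm.mem_iff]
  rw [hfs]
  exact (Finset.sum_congr rfl (fun k _ => by rw [hperm.count_eq k])).symm

-- ===== VERDICT (by name: the statement is the Claim_ definition above) =====
theorem sockMerchant_spec : Claim_equal_sockMerchant := by
  intro n ar _
  unfold Spec_sockMerchant
  exact pv_main n ar
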